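-- pv_equiv track=rewrite | github.com/airbytehq/airbyte | airbyte-integrations/connectors/source-airmeet/venv/Lib/site-packages/dateparser_scripts/order_languages.py | generate_language_map
-- ===== SOURCE A (Python) =====
-- def generate_language_map(language_order):
--     data = {}
--     for lang in sorted(language_order):
--         if "-" not in lang:
--             data[lang] = [lang]
--         else:
--             data[lang.split("-")[0]].append(lang)
--     return data
-- ===== SOURCE B (Python) =====
-- def generate_language_map(language_order):
--     # Partition the languages up front: plain bases vs dashed variants,
--     # sort each part separately, and assemble the mapping at the end.
--     bases = sorted({l for l in language_order if "-" not in l})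
--     variants = {b: [] for b in bases}
--     for v in sorted(l for l in language_order if "-" in l):
--         variants[v.split("-")[0]].append(v)
--     return {b: [b] + variants[b] for b in bases}
-- ===== Notes on version B (the rewrite author's own statement) =====
-- stated objective: alternative
-- what changed: Instead of one sorted scan that branches per element on an evolving dict, B partitions the input up front (plain bases vs dashed variants), sorts the deduplicated bases and the variants separately, fills a fresh per-base variants table, and assembles the result with a final comprehension.
import Mathlib
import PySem

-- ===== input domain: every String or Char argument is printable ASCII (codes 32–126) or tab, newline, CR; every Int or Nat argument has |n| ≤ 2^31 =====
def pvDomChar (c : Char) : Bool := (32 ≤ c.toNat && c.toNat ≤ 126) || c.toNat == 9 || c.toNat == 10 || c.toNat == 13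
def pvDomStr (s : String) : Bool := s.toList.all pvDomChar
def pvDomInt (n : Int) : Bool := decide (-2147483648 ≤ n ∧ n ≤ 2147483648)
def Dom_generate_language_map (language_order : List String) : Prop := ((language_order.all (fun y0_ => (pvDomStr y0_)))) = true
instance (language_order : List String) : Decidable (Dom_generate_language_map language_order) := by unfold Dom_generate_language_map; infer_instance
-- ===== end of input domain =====

-- B re-groups the work: partition into bases/variants first, sort the two parts separately, assemble
-- the result at the end — a different decomposition of the same job (return value only; A mutates nothing).

-- ===== PORT A =====
-- lang.split("-")[0]: split? is none only for sep = "" (here sep is "-"), and a split result is never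
-- the empty list, so [0] is the head; both fallback defaults are unreachable.
def pvSplitHead (lang : String) : String :=
  match PySem.Str.split? lang "-" with
  | some ps => ps.headD ""
  | none => ""

-- data[lang] = [lang]
def pvIns (d : PySem.Dict String (List String)) (lang : String) : PySem.Dict String (List String) :=
  d.insert lang [lang]

-- data[v.split("-")[0]].append(v); on a missing key Python raises KeyError — those inputs are
-- excluded by Pre_generate_language_map, the port leaves the dict unchanged there.
def pvApp (d : PySem.Dict String (List String)) (v : String) : PySem.Dict String (List String) :=
  match d.get? (pvSplitHead v) with
  | some vs => d.insert (pvSplitHead v) (vs ++ [v])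
  | none => d

def generate_language_map (language_order : List String) : List (String × List String) :=
  ((PySem.List.sorted language_order (fun x => x)).foldl
    (fun data lang =>
      if PySem.Str.isIn "-" lang = false then pvIns data lang
      else pvApp data lang)
    PySem.Dict.empty).items

-- ===== PORT B =====
-- bases = sorted(set(l for l in language_order if "-" not in l)); variants = {b: [] for b in bases};
-- for v in sorted(l for l in language_order if "-" in l): variants[v.split("-")[0]].append(v)
-- (same KeyError remark as at pvApp above); return {b: [b] + variants[b] for b in bases}.
-- The final dict comprehension runs over the duplicate-free `bases`, so its item list is exactly this
-- map; every b in bases is a key of variants, so variants.getD b [] is Python's variants[b].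
def generate_language_map_alt (language_order : List String) : List (String × List String) :=
  let bases := PySem.List.sorted
    (PySem.Set.ofList (language_order.filter (fun l => !PySem.Str.isIn "-" l))) (fun x => x)
  let variants := (PySem.List.sorted (language_order.filter (fun l => PySem.Str.isIn "-" l)) (fun x => x)).foldl
      pvApp (bases.foldl (fun d b => d.insert b ([] : List String)) PySem.Dict.empty)
  bases.map (fun b => (b, b :: variants.getD b []))

-- ===== PRECONDITION & SPEC =====
-- Pre_ excludes exactly the inputs on which Python A raises KeyError: some language containing "-"
-- whose base (the part before the first "-") is not itself in the list.
def Pre_generate_language_map (language_order : List String) : Prop :=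
  ∀ lang ∈ language_order, PySem.Str.isIn "-" lang = true →
    String.ofList (lang.toList.takeWhile (fun c => c != '-')) ∈ language_order
instance (language_order : List String) : Decidable (Pre_generate_language_map language_order) := by
  unfold Pre_generate_language_map; infer_instance
def pvWitness_generate_language_map : List String := ["en", "en-US", "pt-BR", "pt"]
def Spec_generate_language_map (language_order : List String) (out : List (String × List String)) : Prop :=
  out = generate_language_map_alt language_order
instance (language_order : List String) (out : List (String × List String)) : Decidable (Spec_generate_language_map language_order out) := by
  unfold Spec_generate_language_map; infer_instance

-- ===== CLAIM (what is proved, stated in full; the proofs are below) =====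
def Claim_equal_generate_language_map : Prop := ∀ (language_order : List String), Dom_generate_language_map language_order → Pre_generate_language_map language_order → Spec_generate_language_map language_order (generate_language_map language_order)

-- ===== LEMMAS AND PROOFS =====

-- `lang.split("-")[0]` is the maximal dash-free prefix of lang.
theorem pvGo_head (fuel : Nat) (l cur : List Char) (acc : List (List Char)) (h : l.length < fuel) :
    ∃ tail, PySem.Chars.splitOn.go ['-'] fuel l cur acc
      = acc.reverse ++ (cur.reverse ++ l.takeWhile (fun c => c != '-')) :: tail := by
  induction fuel generalizing l cur acc with
  | zero => omega
  | succ f ih =>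
    cases l with
    | nil => exact ⟨[], by simp [PySem.Chars.splitOn.go]⟩
    | cons c rest =>
      by_cases hc : c = '-'
      · subst hc
        have heq : PySem.Chars.splitOn.go ['-'] (f+1) ('-'::rest) cur acc
            = PySem.Chars.splitOn.go ['-'] f rest [] (cur.reverse :: acc) := by
          simp [PySem.Chars.splitOn.go, List.isPrefixOf]
        obtain ⟨t, ht⟩ := ih rest [] (cur.reverse :: acc) (by simp at h ⊢; omega)
        exact ⟨rest.takeWhile (fun c => c != '-') :: t, by rw [heq, ht]; simp⟩
      · have hpre : List.isPrefixOf ['-'] (c::rest) = false := by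
          simp [List.isPrefixOf]; exact fun h => hc h.symm
        have heq : PySem.Chars.splitOn.go ['-'] (f+1) (c::rest) cur acc
            = PySem.Chars.splitOn.go ['-'] f rest (c :: cur) acc := by
          simp [PySem.Chars.splitOn.go, hpre]
        obtain ⟨t, ht⟩ := ih rest (c :: cur) acc (by simp at h ⊢; omega)
        exact ⟨t, by rw [heq, ht]; simp [hc]⟩

theorem pvSplitHead_eq (lang : String) :
    pvSplitHead lang = String.ofList (lang.toList.takeWhile (fun c => c != '-')) := by
  obtain ⟨t, ht⟩ := pvGo_head (lang.length + 1) lang.toList [] []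
    (by rw [String.length_toList]; omega)
  simp [pvSplitHead, PySem.Str.split?, PySem.Chars.split?, PySem.Chars.splitOn,
    show ("-" : String).toList = ['-'] from rfl, String.length_toList, ht]

theorem pvDashDecomp (l : List Char) (h : '-' ∈ l) :
    ∃ t, l = l.takeWhile (fun c => c != '-') ++ '-' :: t := by
  have hd : l.dropWhile (fun c => c != '-') ≠ [] := by
    intro he
    have h2 := List.takeWhile_append_dropWhile (p := fun c => c != '-') (l := l)
    rw [he, List.append_nil] at h2
    rw [← h2] at h
    have := List.mem_takeWhile_imp h
    simp at this
  have hc := List.head_dropWhile_not (p := fun c => c != '-') (l := l) hd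
  obtain ⟨c, t, hct⟩ := List.exists_cons_of_ne_nil hd
  have hc' : c = '-' := by
    have : (l.dropWhile (fun c => c != '-')).head hd = c := by simp [hct]
    rw [this] at hc; simpa using hc
  refine ⟨t, ?_⟩
  conv_lhs => rw [← List.takeWhile_append_dropWhile (p := fun c => c != '-') (l := l)]
  rw [hct, hc']

theorem pvPrefix_lt (ys : List Char) (c : Char) (t : List Char) : ys < ys ++ c :: t := by
  induction ys with
  | nil => exact List.nil_lt_cons c t
  | cons a ys ih =>
    simp only [List.cons_append]
    exact List.cons_lt_cons_iff.mpr (Or.inr ⟨rfl, ih⟩)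

-- a dashed string sorts strictly after its base
theorem pvBase_ne_of_le (x y : String) (hx : PySem.Str.isIn "-" x = true) (hle : x ≤ y) :
    pvSplitHead x ≠ y := by
  intro he
  have hm : '-' ∈ x.toList := by
    have := (PySem.Str.isIn_iff_infix "-" x).mp hx
    simpa using this.mem (by simp : '-' ∈ ("-" : String).toList)
  obtain ⟨t, ht⟩ := pvDashDecomp x.toList hm
  have hlt : pvSplitHead x < x := by
    rw [String.lt_iff_toList_lt, pvSplitHead_eq]
    have h2 : (String.ofList (x.toList.takeWhile (fun c => c != '-'))).toList
        = x.toList.takeWhile (fun c => c != '-') := by simp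
    rw [h2]
    conv_rhs => rw [ht]
    exact pvPrefix_lt _ _ _
  rw [he] at hlt
  exact absurd hle (not_le.mpr hlt)

-- overwriting an existing key commutes with inserting a different key
theorem pvInsert_insert_comm (d : PySem.Dict String (List String)) (k k' : String)
    (v v' : List String) (hne : k ≠ k') (hk : d.contains k = true) :
    (d.insert k v).insert k' v' = (d.insert k' v').insert k v := by
  apply PySem.Dict.ext
  by_cases hk' : d.contains k' = true
  · rw [PySem.Dict.items_insert_of_contains _ _ (by rw [PySem.Dict.contains_insert]; simp [hk']),
      PySem.Dict.items_insert_of_contains _ _ hk,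
      PySem.Dict.items_insert_of_contains _ _ (by rw [PySem.Dict.contains_insert]; simp [hk]),
      PySem.Dict.items_insert_of_contains _ _ hk']
    simp only [List.map_map]
    apply List.map_congr_left
    intro p _
    by_cases h1 : p.1 = k <;> by_cases h2 : p.1 = k' <;>
      simp [Function.comp, h1, h2, hne, Ne.symm hne]
  · rw [PySem.Dict.items_insert_of_not_contains _ _
        (by rw [PySem.Dict.contains_insert]; simp [hk', Ne.symm hne]),
      PySem.Dict.items_insert_of_contains _ _ hk,
      PySem.Dict.items_insert_of_contains _ _ (by rw [PySem.Dict.contains_insert]; simp [hk]),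
      PySem.Dict.items_insert_of_not_contains _ _ (by simpa using hk'),
      List.map_append]
    simp [Ne.symm hne]

theorem pvIns_app_comm (d : PySem.Dict String (List String)) (v b : String)
    (hne : pvSplitHead v ≠ b) : pvIns (pvApp d v) b = pvApp (pvIns d b) v := by
  unfold pvApp pvIns
  have hget : (d.insert b [b]).get? (pvSplitHead v) = d.get? (pvSplitHead v) :=
    PySem.Dict.get?_insert_of_ne d [b] hne
  rw [hget]
  cases hg : d.get? (pvSplitHead v) with
  | none => rfl
  | some vs =>
    have hk : d.contains (pvSplitHead v) = true := by
      rw [PySem.Dict.contains_eq_isSome_get?, hg]; rfl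
    exact pvInsert_insert_comm d (pvSplitHead v) b (vs ++ [v]) [b] hne hk

theorem pvComm_fold (bs : List String) (d : PySem.Dict String (List String)) (x : String)
    (h : ∀ b ∈ bs, pvSplitHead x ≠ b) :
    List.foldl pvIns (pvApp d x) bs = pvApp (List.foldl pvIns d bs) x := by
  induction bs generalizing d with
  | nil => rfl
  | cons b bs ih =>
    simp only [List.foldl_cons]
    rw [pvIns_app_comm d x b (h b (by simp)), ih (pvIns d b) (fun b' hb' => h b' (by simp [hb']))]

-- the interleaved sorted scan splits into an insert pass and an append pass
theorem pvSplitPass (s : List String) (d : PySem.Dict String (List String))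
    (hp : List.Pairwise (fun x y => PySem.Str.isIn "-" x = true → pvSplitHead x ≠ y) s) :
    s.foldl (fun data lang =>
      if PySem.Str.isIn "-" lang = false then pvIns data lang else pvApp data lang) d
    = List.foldl pvApp
        (List.foldl pvIns d (s.filter (fun l => !PySem.Str.isIn "-" l)))
        (s.filter (fun l => PySem.Str.isIn "-" l)) := by
  induction s generalizing d with
  | nil => rfl
  | cons x t ih =>
    rcases List.pairwise_cons.mp hp with ⟨hx, hp'⟩
    by_cases hd : PySem.Str.isIn "-" x = true
    · have hdc : PySem.Chars.isIn ['-'] x.toList = true := by simpa using hd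
      have hfN : List.filter (fun l => !PySem.Str.isIn "-" l) (x::t)
          = List.filter (fun l => !PySem.Str.isIn "-" l) t := by simp [hdc]
      have hfD : List.filter (fun l => PySem.Str.isIn "-" l) (x::t)
          = x :: List.filter (fun l => PySem.Str.isIn "-" l) t := by simp [hdc]
      rw [List.foldl_cons, hfN, hfD, List.foldl_cons, if_neg (by simp [hdc]), ih (pvApp d x) hp',
        pvComm_fold _ d x (fun b hb => hx b (List.mem_of_mem_filter hb) hd)]
    · have hd' : PySem.Str.isIn "-" x = false := by simpa using hd
      have hdc : PySem.Chars.isIn ['-'] x.toList = false := by simpa using hd'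
      have hfN : List.filter (fun l => !PySem.Str.isIn "-" l) (x::t)
          = x :: List.filter (fun l => !PySem.Str.isIn "-" l) t := by simp [hdc]
      have hfD : List.filter (fun l => PySem.Str.isIn "-" l) (x::t)
          = List.filter (fun l => PySem.Str.isIn "-" l) t := by simp [hdc]
      rw [List.foldl_cons, hfN, hfD, List.foldl_cons, if_pos hd', ih (pvIns d x) hp']

-- the insert pass over a list with duplicates builds the base dictionary
theorem pvInsPass (bs seen : List String) :
    List.foldl pvIns ⟨seen.map (fun b => (b, [b]))⟩ bs
    = ⟨(List.foldl PySem.Set.add seen bs).map (fun b => (b, [b]))⟩ := by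
  induction bs generalizing seen with
  | nil => rfl
  | cons x bs ih =>
    have hcont : (PySem.Dict.mk (seen.map (fun b => (b, [b])))).contains x = seen.contains x := by
      rw [PySem.Dict.contains_mk]
      simp only [List.any_map]
      simp [Function.comp_def, List.any_beq']
    simp only [List.foldl_cons]
    by_cases hx : seen.contains x = true
    · have h1 : pvIns ⟨seen.map (fun b => (b, [b]))⟩ x = ⟨seen.map (fun b => (b, [b]))⟩ := by
        apply PySem.Dict.ext
        rw [pvIns, PySem.Dict.items_insert_of_contains _ _ (by rw [hcont]; exact hx)]
        show _ = seen.map (fun b => (b, [b]))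
        rw [List.map_map]
        apply List.map_congr_left
        intro b _
        by_cases hb : b = x <;> simp [Function.comp, hb]
      rw [h1, ih, show PySem.Set.add seen x = seen from by
        rw [PySem.Set.add, PySem.Set.contains_eq_listContains, if_pos hx]]
    · have h1 : pvIns ⟨seen.map (fun b => (b, [b]))⟩ x = ⟨(seen ++ [x]).map (fun b => (b, [b]))⟩ := by
        apply PySem.Dict.ext
        rw [pvIns, PySem.Dict.items_insert_of_not_contains _ _ (by rw [hcont]; simpa using hx)]
        simp
      rw [h1, ih, show PySem.Set.add seen x = seen ++ [x] from by
        rw [PySem.Set.add, PySem.Set.contains_eq_listContains, if_neg hx]]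

-- the append pass distributes each variant onto its base's bucket
theorem pvAppPass (vs bases : List String) (w : String → List String) (hnd : bases.Nodup) :
    (List.foldl pvApp ⟨bases.map (fun b => (b, w b))⟩ vs).items
    = bases.map (fun b => (b, w b ++ vs.filter (fun v => pvSplitHead v == b))) := by
  induction vs generalizing w with
  | nil => simp [PySem.Dict.items]
  | cons v vs ih =>
    have hkeys : (PySem.Dict.mk (bases.map (fun b => (b, w b)))).keys = bases := by
      rw [PySem.Dict.keys_mk, List.map_map]; simp [Function.comp_def]
    simp only [List.foldl_cons]
    by_cases hb : pvSplitHead v ∈ bases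
    · have hget : (PySem.Dict.mk (bases.map (fun b => (b, w b)))).get? (pvSplitHead v)
          = some (w (pvSplitHead v)) := by
        apply PySem.Dict.get?_of_mem_items
        · exact List.mem_map_of_mem hb
        · rw [hkeys]; exact hnd
      have hstep : pvApp ⟨bases.map (fun b => (b, w b))⟩ v
          = ⟨bases.map (fun b => (b, if b == pvSplitHead v then w b ++ [v] else w b))⟩ := by
        apply PySem.Dict.ext
        rw [pvApp, hget]
        simp only
        rw [PySem.Dict.items_insert_of_contains _ _
          (by rw [PySem.Dict.contains_iff_mem_keys, hkeys]; exact hb)]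
        simp only [PySem.Dict.items, List.map_map]
        apply List.map_congr_left
        intro b _
        by_cases h1 : b = pvSplitHead v
        · subst h1; simp [Function.comp]
        · simp [Function.comp, h1, fun h => h1 (by simpa using h)]
      rw [hstep, ih (fun b => if b == pvSplitHead v then w b ++ [v] else w b)]
      apply List.map_congr_left
      intro b _
      by_cases h1 : pvSplitHead v = b
      · subst h1; simp [List.filter_cons]
      · have h2 : (b == pvSplitHead v) = false :=
          beq_eq_false_iff_ne.mpr (fun h => h1 h.symm)
        simp [List.filter_cons, h1, h2]
    · have hget : (PySem.Dict.mk (bases.map (fun b => (b, w b)))).get? (pvSplitHead v) = none := by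
        rw [PySem.Dict.get?_eq_none_iff_not_mem_keys, hkeys]; exact hb
      have hstep : pvApp ⟨bases.map (fun b => (b, w b))⟩ v = ⟨bases.map (fun b => (b, w b))⟩ := by
        rw [pvApp, hget]
      rw [hstep, ih w]
      apply List.map_congr_left
      intro b hbm
      have h1 : pvSplitHead v ≠ b := fun h => hb (h ▸ hbm)
      simp [List.filter_cons, h1, fun h => h1 (by simpa using h)]

-- foldl Set.add only appends a subsequence of its input
theorem pvFoldlAdd_sublist (xs s : List String) :
    ∃ t, List.Sublist t xs ∧ List.foldl PySem.Set.add s xs = s ++ t := by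
  induction xs generalizing s with
  | nil => exact ⟨[], List.nil_sublist _, by simp⟩
  | cons x xs ih =>
    simp only [List.foldl_cons, PySem.Set.add]
    by_cases hx : PySem.Set.contains s x = true
    · obtain ⟨t, hts, ht⟩ := ih s
      rw [if_pos hx]
      exact ⟨t, hts.cons x, ht⟩
    · obtain ⟨t, hts, ht⟩ := ih (s ++ [x])
      rw [if_neg hx]
      exact ⟨x :: t, hts.cons₂ x, by rw [ht]; simp⟩

-- canonical form shared by both ports
theorem pvA_canon (L : List String) :
    generate_language_map L
    = (PySem.Set.ofList ((PySem.List.sorted L (fun x => x)).filter (fun l => !PySem.Str.isIn "-" l))).map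
        (fun b => (b, [b] ++ ((PySem.List.sorted L (fun x => x)).filter (fun l => PySem.Str.isIn "-" l)).filter
          (fun v => pvSplitHead v == b))) := by
  have hp : List.Pairwise (fun x y => PySem.Str.isIn "-" x = true → pvSplitHead x ≠ y)
      (PySem.List.sorted L (fun x => x)) :=
    (PySem.List.sorted_pairwise L (fun x => x)).imp (fun hle hx => pvBase_ne_of_le _ _ hx hle)
  unfold generate_language_map
  rw [pvSplitPass _ _ hp]
  have h0 : (PySem.Dict.empty : PySem.Dict String (List String))
      = ⟨([] : List String).map (fun b => (b, [b]))⟩ := rfl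
  rw [h0, pvInsPass]
  rw [show (List.foldl PySem.Set.add ([] : List String) ((PySem.List.sorted L (fun x => x)).filter (fun l => !PySem.Str.isIn "-" l)))
      = PySem.Set.ofList ((PySem.List.sorted L (fun x => x)).filter (fun l => !PySem.Str.isIn "-" l)) from rfl]
  exact pvAppPass _ _ _ (PySem.Set.nodup_ofList _)

theorem pvB_canon (L : List String) :
    generate_language_map_alt L
    = (PySem.Set.ofList ((PySem.List.sorted L (fun x => x)).filter (fun l => !PySem.Str.isIn "-" l))).map
        (fun b => (b, [b] ++ ((PySem.List.sorted L (fun x => x)).filter (fun l => PySem.Str.isIn "-" l)).filter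
          (fun v => pvSplitHead v == b))) := by
  have hpair : List.Pairwise (· ≤ ·) (PySem.List.sorted L (fun x => x)) :=
    PySem.List.sorted_pairwise L (fun x => x)
  have hnd : (PySem.Set.ofList ((PySem.List.sorted L (fun x => x)).filter (fun l => !PySem.Str.isIn "-" l))).Nodup :=
    PySem.Set.nodup_ofList _
  have hbases : PySem.List.sorted (PySem.Set.ofList (L.filter (fun l => !PySem.Str.isIn "-" l))) (fun x => x)
      = PySem.Set.ofList ((PySem.List.sorted L (fun x => x)).filter (fun l => !PySem.Str.isIn "-" l)) := by
    apply PySem.List.sorted_id_eq_of_perm_of_pairwise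
    · rw [List.perm_ext_iff_of_nodup (PySem.Set.nodup_ofList _) (PySem.Set.nodup_ofList _)]
      intro a
      rw [PySem.Set.mem_ofList, PySem.Set.mem_ofList, List.mem_filter, List.mem_filter,
        PySem.List.mem_sorted]
    · obtain ⟨t, hts, ht⟩ := pvFoldlAdd_sublist
        ((PySem.List.sorted L (fun x => x)).filter (fun l => !PySem.Str.isIn "-" l)) []
      have he : PySem.Set.ofList ((PySem.List.sorted L (fun x => x)).filter (fun l => !PySem.Str.isIn "-" l)) = t := by
        rw [PySem.Set.ofList_eq_foldl, ht]; simp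
      rw [he]
      exact hpair.sublist (hts.trans List.filter_sublist)
  have hvars : PySem.List.sorted (L.filter (fun l => PySem.Str.isIn "-" l)) (fun x => x)
      = (PySem.List.sorted L (fun x => x)).filter (fun l => PySem.Str.isIn "-" l) := by
    apply PySem.List.sorted_id_eq_of_perm_of_pairwise
    · exact (PySem.List.sorted_perm L (fun x => x) false).filter _
    · exact hpair.sublist List.filter_sublist
  unfold generate_language_map_alt
  rw [hbases, hvars]
  set bases0 := PySem.Set.ofList ((PySem.List.sorted L (fun x => x)).filter (fun l => !PySem.Str.isIn "-" l))
  set sD := (PySem.List.sorted L (fun x => x)).filter (fun l => PySem.Str.isIn "-" l)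
  have hinit : (List.foldl (fun d b => d.insert b ([] : List String)) PySem.Dict.empty bases0)
      = ⟨bases0.map (fun b => (b, ([] : List String)))⟩ := by
    apply PySem.Dict.ext
    rw [PySem.Dict.items_foldl_insert_fresh bases0 (fun b => b) (fun _ => []) PySem.Dict.empty
      (fun a _ => by simp) (by simpa using hnd)]
    simp
    rfl
  show List.map (fun b => (b, b :: (List.foldl pvApp
      (List.foldl (fun d b => d.insert b ([] : List String)) PySem.Dict.empty bases0) sD).getD b [])) bases0 = _
  rw [hinit]
  have hitems := pvAppPass sD bases0 (fun _ => []) hnd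
  apply List.map_congr_left
  intro b hbm
  have hk : (List.foldl pvApp ⟨bases0.map (fun b => (b, ([] : List String)))⟩ sD).get? b
      = some (([] : List String) ++ sD.filter (fun v => pvSplitHead v == b)) := by
    apply PySem.Dict.get?_of_mem_items
    · rw [PySem.Dict.items] at hitems ⊢
      rw [hitems]
      exact List.mem_map_of_mem hbm
    · rw [PySem.Dict.keys, hitems, List.map_map]
      simpa [Function.comp_def] using hnd
  rw [PySem.Dict.getD_eq_get?_getD, hk]
  simp

-- ===== VERDICT (by name: the statement is the Claim_ definition above) =====
theorem generate_language_map_spec : Claim_equal_generate_language_map := by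
  intro L _ _
  unfold Spec_generate_language_map
  rw [pvA_canon, pvB_canon]
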